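-- pv_equiv track=rewrite | github.com/Santoshhhhhhh/Eco_Inspection | api/app.py | find_most_frequent_number
-- ===== SOURCE A (Python) =====
-- def find_most_frequent_number(max_1, max_2, max_3):
--
--     frequency_dict = {max_1: 0, max_2: 0, max_3: 0}
--     frequency_dict[max_1] += 1
--     frequency_dict[max_2] += 1
--     frequency_dict[max_3] += 1
--
--     max_frequency = max(frequency_dict.values())
--
--     most_frequent_numbers = [number for number, frequency in frequency_dict.items() if frequency == max_frequency]
--
--     return most_frequent_numbers[0]
-- ===== SOURCE B (Python) =====
-- def find_most_frequent_number(max_1, max_2, max_3):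
--     # closed-form mode of three: a non-first value wins only when it is a strict majority
--     return max_2 if max_2 == max_3 and max_1 != max_2 else max_1
-- ===== Notes on version B (the rewrite author's own statement) =====
-- stated objective: simpler
-- what changed: Replaced the frequency-dict counting, max over values and list filtering with a closed-form conditional: return max_2 only when max_2 == max_3 and max_1 != max_2, else max_1.
import Mathlib
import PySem

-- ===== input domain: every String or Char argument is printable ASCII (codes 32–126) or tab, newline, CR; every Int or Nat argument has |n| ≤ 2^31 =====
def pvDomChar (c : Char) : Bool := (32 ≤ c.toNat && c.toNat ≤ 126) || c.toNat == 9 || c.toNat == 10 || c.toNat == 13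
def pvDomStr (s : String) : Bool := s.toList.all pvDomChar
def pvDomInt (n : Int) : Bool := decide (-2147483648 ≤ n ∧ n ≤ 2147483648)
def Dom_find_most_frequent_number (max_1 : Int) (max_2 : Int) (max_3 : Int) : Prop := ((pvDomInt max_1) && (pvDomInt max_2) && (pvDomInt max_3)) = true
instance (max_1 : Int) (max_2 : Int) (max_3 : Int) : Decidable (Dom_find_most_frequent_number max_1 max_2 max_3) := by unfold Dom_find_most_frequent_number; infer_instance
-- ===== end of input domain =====

-- B replaces A's frequency-dict counting with a closed-form conditional (simpler).
-- ===== PORT A =====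
def find_most_frequent_number (max_1 : Int) (max_2 : Int) (max_3 : Int) : Int :=
  let frequency_dict : PySem.Dict Int Int :=
    ((PySem.Dict.empty.insert max_1 0).insert max_2 0).insert max_3 0
  let frequency_dict := frequency_dict.modify max_1 0 (· + 1)
  let frequency_dict := frequency_dict.modify max_2 0 (· + 1)
  let frequency_dict := frequency_dict.modify max_3 0 (· + 1)
  let max_frequency : Int :=
    match PySem.List.max? frequency_dict.values (fun x => x) with
    | some m => m
    | none => 0   -- unreachable: the dict always holds max_1
  let most_frequent_numbers :=
    (frequency_dict.items.filter (fun p => p.2 == max_frequency)).map (fun p => p.1)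
  match most_frequent_numbers with
  | x :: _ => x
  | [] => 0       -- unreachable: the max frequency is attained

-- ===== PORT B =====
def find_most_frequent_number_alt (max_1 : Int) (max_2 : Int) (max_3 : Int) : Int :=
  if max_2 = max_3 ∧ max_1 ≠ max_2 then max_2 else max_1

-- ===== PRECONDITION & SPEC =====
def Spec_find_most_frequent_number (max_1 : Int) (max_2 : Int) (max_3 : Int) (out : Int) : Prop := out = find_most_frequent_number_alt max_1 max_2 max_3
instance (max_1 : Int) (max_2 : Int) (max_3 : Int) (out : Int) : Decidable (Spec_find_most_frequent_number max_1 max_2 max_3 out) := by unfold Spec_find_most_frequent_number; infer_instance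

-- ===== CLAIM (what is proved, stated in full; the proofs are below) =====
def Claim_equal_find_most_frequent_number : Prop := ∀ (max_1 : Int) (max_2 : Int) (max_3 : Int), Dom_find_most_frequent_number max_1 max_2 max_3 → Spec_find_most_frequent_number max_1 max_2 max_3 (find_most_frequent_number max_1 max_2 max_3)

-- ===== LEMMAS AND PROOFS =====

-- ===== VERDICT (by name: the statement is the Claim_ definition above) =====
theorem find_most_frequent_number_spec : Claim_equal_find_most_frequent_number := by
  intro m1 m2 m3 _
  unfold Spec_find_most_frequent_number find_most_frequent_number find_most_frequent_number_alt
  rcases eq_or_ne m1 m2 with h12 | h12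
  · rcases eq_or_ne m1 m3 with h13 | h13
    · subst h12; subst h13
      simp [PySem.Dict.empty, PySem.Dict.insert, PySem.Dict.modify, PySem.Dict.contains,
          PySem.Dict.getD, PySem.Dict.get?, PySem.Dict.values,
          PySem.List.max?, beq_iff_eq]
    · subst h12
      simp [PySem.Dict.empty, PySem.Dict.insert, PySem.Dict.modify, PySem.Dict.contains,
          PySem.Dict.getD, PySem.Dict.get?, PySem.Dict.values,
          PySem.List.max?, beq_iff_eq, h13, Ne.symm h13]
  · rcases eq_or_ne m1 m3 with h13 | h13
    · subst h13
      simp [PySem.Dict.empty, PySem.Dict.insert, PySem.Dict.modify, PySem.Dict.contains,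
          PySem.Dict.getD, PySem.Dict.get?, PySem.Dict.values,
          PySem.List.max?, beq_iff_eq, h12, Ne.symm h12]
    · rcases eq_or_ne m2 m3 with h23 | h23
      · subst h23
        simp [PySem.Dict.empty, PySem.Dict.insert, PySem.Dict.modify, PySem.Dict.contains,
          PySem.Dict.getD, PySem.Dict.get?, PySem.Dict.values,
          PySem.List.max?, beq_iff_eq, h12, Ne.symm h12]
      · simp [PySem.Dict.empty, PySem.Dict.insert, PySem.Dict.modify, PySem.Dict.contains,
          PySem.Dict.getD, PySem.Dict.get?, PySem.Dict.values,
          PySem.List.max?, beq_iff_eq, h12, h13, h23, Ne.symm h12, Ne.symm h13, Ne.symm h23]
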